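-- pv_equiv track=rewrite | github.com/Lerskk/ProgrammingII-C | theory/codigo.py | obtenerDiagonales
-- ===== SOURCE A (Python) =====
-- def obtenerDiagonales(tablero, tamanio):
--     diagonales = []
--
--     # Recorrer filas empezando desde filas negativas. Esto sirve para alcanzar todas las diagonales del tablero, ya que la variable filaInicial se refiere a la fila de la casilla en la que empieza la diagonal (casilla pegada a un borde), pero no siempre esta dento del tablero. Por ejemplo, si tomamos en cuenta en el siguiente tablero formado unicamente por las letras mayusculas (las minusculas son para referencia nada mas), si yo quisiera obtener la diagonal ["B", "F"], la puedo pensar como la diagonal ["m", "B", "F"] (sacando la "m"), que empieza en la fila -1: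
--     # Fila -1: m n o
--     # Fila  0: A B C
--     # Fila  1: D E F
--     # Fila  2: G H I
--     # Fila  3: J K L
--     for filaIncial in range(-(tamanio-2), tamanio):
--         # Diagonal hacia abajo a la derecha
--         diagonal = []
--         fila = filaIncial
--         columna = 0 # Empezar desde la izquierda
--         while fila < tamanio and columna < tamanio-1: # Mientras no se salga de los bordes del tablero
--             if (fila >= 0): # Si la casilla esta realmente dentro del tablero, agregarla a la diagonal
--                 diagonal.append(tablero[fila][columna])
--             fila += 1 # Recorrer hacia abajo
--             columna += 1 # Recorrer hacia la izquierda
--         diagonales.append(diagonal) # Agregar diagonal resultante a la lista de diagonales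
--
--         # Diagonal hacia abajo a la izquierda
--         diagonal = []
--         fila = filaIncial
--         columna = tamanio - 2 # Empezar desde la derecha
--         while fila < tamanio and columna >= 0: # Mientras no se salga de los bordes del tablero
--             if (fila >= 0): # Si la casilla esta realmente dentro del tablero, agregarla a la diagonal
--                 diagonal.append(tablero[fila][columna])
--             fila += 1 # Recorrer hacia abajo
--             columna -= 1 # Recorrer hacia la izquierda
--         diagonales.append(diagonal) # Agregar diagonal resultante a la lista de diagonales
--
--     return diagonales
-- ===== SOURCE B (Python) =====
-- def obtenerDiagonales(tablero, tamanio):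
--     # One indexing pass: bucket every cell (last column excluded) into two dicts
--     # keyed by r-c (down-right diagonals) and r+c (down-left diagonals),
--     # then assemble the result in A's interleaved order.
--     dictA = {}
--     dictB = {}
--     for r in range(tamanio):
--         for c in range(tamanio - 1):
--             dictA.setdefault(r - c, []).append(tablero[r][c])
--             dictB.setdefault(r + c, []).append(tablero[r][c])
--     diagonales = []
--     for f in range(-(tamanio - 2), tamanio):
--         diagonales.append(dictA.get(f, []))
--         diagonales.append(dictB.get(f + tamanio - 2, []))
--     return diagonales
-- ===== Notes on version B (the rewrite author's own statement) =====
-- stated objective: alternative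
-- what changed: Replaced A's per-diagonal while-loop walks (one pair of walks per starting row, including virtual negative rows) by a single row-major indexing pass that buckets every cell into two dicts keyed by r-c and r+c, then assembles the diagonals from the buckets in A's interleaved order.
import Mathlib
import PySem

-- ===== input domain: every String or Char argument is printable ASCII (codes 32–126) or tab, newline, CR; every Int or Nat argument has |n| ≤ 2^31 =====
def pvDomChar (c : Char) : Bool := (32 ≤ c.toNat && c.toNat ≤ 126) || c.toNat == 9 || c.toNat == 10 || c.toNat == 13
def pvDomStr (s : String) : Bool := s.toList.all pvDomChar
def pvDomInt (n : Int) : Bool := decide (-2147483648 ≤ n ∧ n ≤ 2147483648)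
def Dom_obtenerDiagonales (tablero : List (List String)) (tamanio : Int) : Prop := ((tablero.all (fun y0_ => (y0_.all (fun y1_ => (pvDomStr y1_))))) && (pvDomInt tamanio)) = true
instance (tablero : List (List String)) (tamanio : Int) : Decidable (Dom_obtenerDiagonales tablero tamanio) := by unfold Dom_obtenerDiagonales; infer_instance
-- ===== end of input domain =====

-- B replaces A's per-diagonal while-loop walks by one row-major bucketing pass into two
-- dicts keyed by r-c and r+c, then assembles the diagonals in A's interleaved order
-- (objective: alternative decomposition, same asymptotic cost).

-- tablero[r][c]; in-range under Pre_, totalized with a default outside it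
def pvCell (tablero : List (List String)) (r c : Int) : String :=
  PySem.List.pyGetD (PySem.List.pyGetD tablero r []) c ""

-- ===== PORT A =====
-- the down-right while loop of A
def pvDiagDR (tablero : List (List String)) (tamanio fila columna : Int) : List String :=
  if h : fila < tamanio ∧ columna < tamanio - 1 then
    (if 0 ≤ fila then [pvCell tablero fila columna] else []) ++
      pvDiagDR tablero tamanio (fila + 1) (columna + 1)
  else []
termination_by (tamanio - fila).toNat
decreasing_by omega

-- the down-left while loop of A
def pvDiagDL (tablero : List (List String)) (tamanio fila columna : Int) : List String :=
  if h : fila < tamanio ∧ 0 ≤ columna then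
    (if 0 ≤ fila then [pvCell tablero fila columna] else []) ++
      pvDiagDL tablero tamanio (fila + 1) (columna - 1)
  else []
termination_by (tamanio - fila).toNat
decreasing_by omega

def obtenerDiagonales (tablero : List (List String)) (tamanio : Int) : List (List String) :=
  (PySem.List.pyRange (-(tamanio - 2)) tamanio 1).foldl
    (fun diagonales filaInicial =>
      (diagonales ++ [pvDiagDR tablero tamanio filaInicial 0]) ++
        [pvDiagDL tablero tamanio filaInicial (tamanio - 2)]) []

-- ===== PORT B =====
-- one bucketing step: dictA.setdefault(r-c, []).append(v); dictB.setdefault(r+c, []).append(v)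
def pvBStep (tablero : List (List String))
    (ds : PySem.Dict Int (List String) × PySem.Dict Int (List String)) (r c : Int) :
    PySem.Dict Int (List String) × PySem.Dict Int (List String) :=
  (ds.1.modify (r - c) [] (· ++ [pvCell tablero r c]),
   ds.2.modify (r + c) [] (· ++ [pvCell tablero r c]))

def obtenerDiagonales_alt (tablero : List (List String)) (tamanio : Int) : List (List String) :=
  let ds := (PySem.List.pyRange 0 tamanio 1).foldl (fun ds r =>
      (PySem.List.pyRange 0 (tamanio - 1) 1).foldl (fun ds c => pvBStep tablero ds r c) ds)
    (PySem.Dict.empty, PySem.Dict.empty)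
  (PySem.List.pyRange (-(tamanio - 2)) tamanio 1).foldl
    (fun diagonales f =>
      (diagonales ++ [ds.1.getD f []]) ++ [ds.2.getD (f + tamanio - 2) []]) []

-- ===== PRECONDITION & SPEC =====
-- excludes exactly the inputs on which Python A raises IndexError: for tamanio ≥ 2 it reads
-- every cell with row < tamanio and column < tamanio - 1, so the board must be large enough
def Pre_obtenerDiagonales (tablero : List (List String)) (tamanio : Int) : Prop :=
  2 ≤ tamanio →
    (tamanio ≤ (tablero.length : Int) ∧
      ∀ row ∈ tablero.take tamanio.toNat, tamanio - 1 ≤ (row.length : Int))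
instance (tablero : List (List String)) (tamanio : Int) : Decidable (Pre_obtenerDiagonales tablero tamanio) := by unfold Pre_obtenerDiagonales; infer_instance

def pvWitness_obtenerDiagonales : List (List String) × Int :=
  ([["a", "b", "c"], ["d", "e", "f"], ["g", "h", "i"]], 3)

def Spec_obtenerDiagonales (tablero : List (List String)) (tamanio : Int) (out : List (List String)) : Prop := out = obtenerDiagonales_alt tablero tamanio
instance (tablero : List (List String)) (tamanio : Int) (out : List (List String)) : Decidable (Spec_obtenerDiagonales tablero tamanio out) := by unfold Spec_obtenerDiagonales; infer_instance

-- ===== CLAIM (what is proved, stated in full; the proofs are below) =====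
def Claim_equal_obtenerDiagonales : Prop := ∀ (tablero : List (List String)) (tamanio : Int), Dom_obtenerDiagonales tablero tamanio → Pre_obtenerDiagonales tablero tamanio → Spec_obtenerDiagonales tablero tamanio (obtenerDiagonales tablero tamanio)

-- ===== LEMMAS AND PROOFS =====

-- the pair-valued bucketing fold splits into two independent dict folds
theorem pvSplit (tablero : List (List String)) (tamanio : Int) :
    (PySem.List.pyRange 0 tamanio 1).foldl (fun ds r =>
        (PySem.List.pyRange 0 (tamanio - 1) 1).foldl (fun ds c => pvBStep tablero ds r c) ds)
      (PySem.Dict.empty, PySem.Dict.empty)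
    = ((PySem.List.pyRange 0 tamanio 1).foldl (fun d r =>
          (PySem.List.pyRange 0 (tamanio - 1) 1).foldl
            (fun d c => d.modify (r - c) [] (· ++ [pvCell tablero r c])) d) PySem.Dict.empty,
       (PySem.List.pyRange 0 tamanio 1).foldl (fun d r =>
          (PySem.List.pyRange 0 (tamanio - 1) 1).foldl
            (fun d c => d.modify (r + c) [] (· ++ [pvCell tablero r c])) d) PySem.Dict.empty) := by
  have hstep : (fun (ds : PySem.Dict Int (List String) × PySem.Dict Int (List String)) r =>
      (PySem.List.pyRange 0 (tamanio - 1) 1).foldl (fun ds c => pvBStep tablero ds r c) ds)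
      = (fun ds r =>
        ((PySem.List.pyRange 0 (tamanio - 1) 1).foldl
            (fun d c => d.modify (r - c) [] (· ++ [pvCell tablero r c])) ds.1,
         (PySem.List.pyRange 0 (tamanio - 1) 1).foldl
            (fun d c => d.modify (r + c) [] (· ++ [pvCell tablero r c])) ds.2)) := by
    funext ds r
    simpa [pvBStep] using PySem.List.foldl_prod_mk
      (fun d c => d.modify (r - c) [] (· ++ [pvCell tablero r c]))
      (fun d c => d.modify (r + c) [] (· ++ [pvCell tablero r c]))
      (PySem.List.pyRange 0 (tamanio - 1) 1) ds.1 ds.2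
  rw [hstep]
  exact PySem.List.foldl_prod_mk
    (fun d r => (PySem.List.pyRange 0 (tamanio - 1) 1).foldl
        (fun d c => d.modify (r - c) [] (· ++ [pvCell tablero r c])) d)
    (fun d r => (PySem.List.pyRange 0 (tamanio - 1) 1).foldl
        (fun d c => d.modify (r + c) [] (· ++ [pvCell tablero r c])) d)
    (PySem.List.pyRange 0 tamanio 1) PySem.Dict.empty PySem.Dict.empty

-- a nested bucketing fold, read back at key k, collects the matching cells in row-major order
theorem pvBucket (tablero : List (List String)) (tamanio : Int) (key : Int → Int → Int) (k : Int) :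
    ((PySem.List.pyRange 0 tamanio 1).foldl (fun d r =>
        (PySem.List.pyRange 0 (tamanio - 1) 1).foldl
          (fun d c => d.modify (key r c) [] (· ++ [pvCell tablero r c])) d)
      PySem.Dict.empty).getD k []
    = (PySem.List.pyRange 0 tamanio 1).flatMap (fun r =>
        ((PySem.List.pyRange 0 (tamanio - 1) 1).filter (fun c => key r c == k)).map
          (fun c => pvCell tablero r c)) := by
  have hinner : ∀ (r : Int) (d : PySem.Dict Int (List String)),
      (PySem.List.pyRange 0 (tamanio - 1) 1).foldl
          (fun d c => d.modify (key r c) [] (· ++ [pvCell tablero r c])) d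
        = ((PySem.List.pyRange 0 (tamanio - 1) 1).map
              (fun c => (key r c, pvCell tablero r c))).foldl
            (fun d p => d.modify p.1 [] (· ++ [p.2])) d := by
    intro r d
    rw [List.foldl_map]
  simp only [hinner]
  rw [← List.foldl_flatMap, PySem.Dict.getD_foldl_modify_append, PySem.Dict.getD_empty]
  rw [List.filter_flatMap, List.map_flatMap]
  refine List.flatMap_congr (fun r _ => ?_)
  rw [List.filter_map, List.map_map]
  rfl

theorem pvFilterRange (n x : Int) :
    (PySem.List.pyRange 0 n 1).filter (fun c => c == x)
      = if 0 ≤ x ∧ x < n then [x] else [] := by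
  by_cases hn : n ≤ 0
  · rw [PySem.List.pyRange_one_eq_nil hn]
    rw [if_neg (by omega)]
    rfl
  · obtain ⟨m, rfl⟩ : ∃ m : Nat, n = (m : Int) := ⟨n.toNat, by omega⟩
    clear hn
    induction m with
    | zero => simp [PySem.List.pyRange_one_eq_nil]
    | succ m ih =>
      rw [show ((m + 1 : Nat) : Int) = (m : Int) + 1 by push_cast; ring,
        PySem.List.pyRange_one_succ_right (by positivity), List.filter_append, ih]
      by_cases hx : x = (m : Int)
      · subst hx
        rw [if_neg (by omega), if_pos ⟨by positivity, by omega⟩]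
        simp only [List.filter_singleton, beq_self_eq_true, cond_true, List.nil_append]
      · have h2 : ((m : Int) == x) = false := by rw [beq_eq_false_iff_ne]; omega
        simp only [List.filter_singleton, h2, cond_false, List.append_nil]
        split_ifs with h1 h2' h2' <;> first | rfl | (exfalso; omega)

-- A's down-right walk as a flatMap over the remaining rows (invariant columna = fila - f)
theorem pvDR_eq (tablero : List (List String)) (tamanio f fila : Int) :
    pvDiagDR tablero tamanio fila (fila - f)
      = (PySem.List.pyRange fila tamanio 1).flatMap (fun r =>
          if 0 ≤ r ∧ r - f < tamanio - 1 then [pvCell tablero r (r - f)] else []) := by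
  by_cases hlt : fila < tamanio
  · by_cases hcol : fila - f < tamanio - 1
    · rw [pvDiagDR, dif_pos ⟨hlt, hcol⟩, PySem.List.pyRange_one_cons hlt, List.flatMap_cons]
      have ih := pvDR_eq tablero tamanio f (fila + 1)
      rw [show fila - f + 1 = fila + 1 - f by ring, ih]
      by_cases h0 : 0 ≤ fila
      · rw [if_pos h0, if_pos ⟨h0, hcol⟩]
      · rw [if_neg h0, if_neg (by omega)]
    · rw [pvDiagDR, dif_neg (by omega)]
      symm
      rw [List.flatMap_eq_nil_iff]
      intro r hr
      rw [PySem.List.mem_pyRange_one] at hr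
      rw [if_neg (by omega)]
  · rw [pvDiagDR, dif_neg (by omega), PySem.List.pyRange_one_eq_nil (by omega)]
    rfl
termination_by (tamanio - fila).toNat
decreasing_by omega

-- A's down-left walk as a flatMap over the remaining rows (invariant columna = g - fila)
theorem pvDL_eq (tablero : List (List String)) (tamanio g fila : Int) :
    pvDiagDL tablero tamanio fila (g - fila)
      = (PySem.List.pyRange fila tamanio 1).flatMap (fun r =>
          if 0 ≤ r ∧ 0 ≤ g - r then [pvCell tablero r (g - r)] else []) := by
  by_cases hlt : fila < tamanio
  · by_cases hcol : 0 ≤ g - fila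
    · rw [pvDiagDL, dif_pos ⟨hlt, hcol⟩, PySem.List.pyRange_one_cons hlt, List.flatMap_cons]
      have ih := pvDL_eq tablero tamanio g (fila + 1)
      rw [show g - fila - 1 = g - (fila + 1) by ring, ih]
      by_cases h0 : 0 ≤ fila
      · rw [if_pos h0, if_pos ⟨h0, hcol⟩]
      · rw [if_neg h0, if_neg (by omega)]
    · rw [pvDiagDL, dif_neg (by omega)]
      symm
      rw [List.flatMap_eq_nil_iff]
      intro r hr
      rw [PySem.List.mem_pyRange_one] at hr
      rw [if_neg (by omega)]
  · rw [pvDiagDL, dif_neg (by omega), PySem.List.pyRange_one_eq_nil (by omega)]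
    rfl
termination_by (tamanio - fila).toNat
decreasing_by omega

-- a guarded flatMap over a range whose guard fails on every element is empty
theorem pvFlatMapNil (a b : Int) (pr : Int → Prop) [DecidablePred pr] (h : Int → List String)
    (hall : ∀ r, a ≤ r → r < b → ¬ pr r) :
    (PySem.List.pyRange a b 1).flatMap (fun r => if pr r then h r else []) = [] := by
  rw [List.flatMap_eq_nil_iff]
  intro r hr
  rw [PySem.List.mem_pyRange_one] at hr
  rw [if_neg (hall r hr.1 hr.2)]

-- shifting the start of a guarded flatMap from 0 to f when the guards agree on the overlap
theorem pvRangeShift (t f : Int) (p q : Int → Prop) [DecidablePred p] [DecidablePred q]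
    (h : Int → List String)
    (hpq : ∀ r, 0 ≤ r → f ≤ r → (p r ↔ q r))
    (hp : ∀ r, r < f → ¬ p r) (hq : ∀ r, r < 0 → ¬ q r) :
    (PySem.List.pyRange 0 t 1).flatMap (fun r => if p r then h r else [])
      = (PySem.List.pyRange f t 1).flatMap (fun r => if q r then h r else []) := by
  by_cases h1 : 0 < t
  · by_cases h2 : f ≤ 0
    · rw [PySem.List.pyRange_one_append f 0 t h2 (by omega), List.flatMap_append,
        pvFlatMapNil f 0 q h (fun r _ hr0 => hq r hr0), List.nil_append]
      refine List.flatMap_congr (fun r hr => ?_)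
      rw [PySem.List.mem_pyRange_one] at hr
      by_cases hp' : p r
      · rw [if_pos hp', if_pos ((hpq r hr.1 (by omega)).mp hp')]
      · rw [if_neg hp', if_neg (fun hq' => hp' ((hpq r hr.1 (by omega)).mpr hq'))]
    · push Not at h2
      by_cases h3 : f ≤ t
      · rw [PySem.List.pyRange_one_append 0 f t (by omega) h3, List.flatMap_append,
          pvFlatMapNil 0 f p h (fun r _ hrf => hp r hrf), List.nil_append]
        refine List.flatMap_congr (fun r hr => ?_)
        rw [PySem.List.mem_pyRange_one] at hr
        by_cases hp' : p r
        · rw [if_pos hp', if_pos ((hpq r (by omega) hr.1).mp hp')]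
        · rw [if_neg hp', if_neg (fun hq' => hp' ((hpq r (by omega) hr.1).mpr hq'))]
      · rw [PySem.List.pyRange_one_eq_nil (show t ≤ f by omega), List.flatMap_nil,
          pvFlatMapNil 0 t p h (fun r _ hrt => hp r (by omega))]
  · rw [PySem.List.pyRange_one_eq_nil (show t ≤ (0:Int) by omega), List.flatMap_nil,
      pvFlatMapNil f t q h (fun r _ hrt => hq r (by omega))]

-- ===== VERDICT (by name: the statement is the Claim_ definition above) =====
theorem obtenerDiagonales_spec : Claim_equal_obtenerDiagonales := by
  unfold Claim_equal_obtenerDiagonales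
  intro tablero tamanio _ _
  unfold Spec_obtenerDiagonales
  have hA : ∀ f : Int,
      ((PySem.List.pyRange 0 tamanio 1).foldl (fun d r =>
          (PySem.List.pyRange 0 (tamanio - 1) 1).foldl
            (fun d c => d.modify (r - c) [] (· ++ [pvCell tablero r c])) d)
        PySem.Dict.empty).getD f [] = pvDiagDR tablero tamanio f 0 := by
    intro f
    rw [pvBucket tablero tamanio (fun r c => r - c) f]
    have hfilt : ∀ r : Int,
        (PySem.List.pyRange 0 (tamanio - 1) 1).filter (fun c => r - c == f)
          = if 0 ≤ r - f ∧ r - f < tamanio - 1 then [r - f] else [] := by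
      intro r
      rw [← pvFilterRange (tamanio - 1) (r - f)]
      refine List.filter_congr (fun c _ => ?_)
      by_cases hc : c = r - f
      · subst hc
        rw [show r - (r - f) = f by ring, beq_self_eq_true, beq_self_eq_true]
      · rw [beq_eq_false_iff_ne.mpr (by omega : r - c ≠ f), beq_eq_false_iff_ne.mpr hc]
    simp only [hfilt]
    have hmap : ∀ r : Int,
        ((if 0 ≤ r - f ∧ r - f < tamanio - 1 then [r - f] else []).map
          (fun c => pvCell tablero r c))
        = if 0 ≤ r - f ∧ r - f < tamanio - 1 then [pvCell tablero r (r - f)] else [] := by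
      intro r
      split_ifs <;> rfl
    simp only [hmap]
    rw [pvRangeShift tamanio f (fun r => 0 ≤ r - f ∧ r - f < tamanio - 1)
        (fun r => 0 ≤ r ∧ r - f < tamanio - 1) (fun r => [pvCell tablero r (r - f)])
        (fun r h0 hf => ⟨fun hh => ⟨h0, hh.2⟩, fun hh => ⟨by omega, hh.2⟩⟩)
        (fun r hr hpr => by omega) (fun r hr hpr => by omega)]
    have hdr := pvDR_eq tablero tamanio f f
    rw [sub_self] at hdr
    exact hdr.symm
  have hB : ∀ f : Int,
      ((PySem.List.pyRange 0 tamanio 1).foldl (fun d r =>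
          (PySem.List.pyRange 0 (tamanio - 1) 1).foldl
            (fun d c => d.modify (r + c) [] (· ++ [pvCell tablero r c])) d)
        PySem.Dict.empty).getD (f + tamanio - 2) []
        = pvDiagDL tablero tamanio f (tamanio - 2) := by
    intro f
    rw [pvBucket tablero tamanio (fun r c => r + c) (f + tamanio - 2)]
    have hfilt : ∀ r : Int,
        (PySem.List.pyRange 0 (tamanio - 1) 1).filter (fun c => r + c == f + tamanio - 2)
          = if 0 ≤ f + tamanio - 2 - r ∧ f + tamanio - 2 - r < tamanio - 1
              then [f + tamanio - 2 - r] else [] := by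
      intro r
      rw [← pvFilterRange (tamanio - 1) (f + tamanio - 2 - r)]
      refine List.filter_congr (fun c _ => ?_)
      by_cases hc : c = f + tamanio - 2 - r
      · subst hc
        rw [show r + (f + tamanio - 2 - r) = f + tamanio - 2 by ring,
          beq_self_eq_true, beq_self_eq_true]
      · rw [beq_eq_false_iff_ne.mpr (by omega : r + c ≠ f + tamanio - 2),
          beq_eq_false_iff_ne.mpr hc]
    simp only [hfilt]
    have hmap : ∀ r : Int,
        ((if 0 ≤ f + tamanio - 2 - r ∧ f + tamanio - 2 - r < tamanio - 1
            then [f + tamanio - 2 - r] else []).map (fun c => pvCell tablero r c))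
        = if 0 ≤ f + tamanio - 2 - r ∧ f + tamanio - 2 - r < tamanio - 1
            then [pvCell tablero r (f + tamanio - 2 - r)] else [] := by
      intro r
      split_ifs <;> rfl
    simp only [hmap]
    rw [pvRangeShift tamanio f
        (fun r => 0 ≤ f + tamanio - 2 - r ∧ f + tamanio - 2 - r < tamanio - 1)
        (fun r => 0 ≤ r ∧ 0 ≤ f + tamanio - 2 - r)
        (fun r => [pvCell tablero r (f + tamanio - 2 - r)])
        (fun r h0 hf => ⟨fun hh => ⟨h0, hh.1⟩, fun hh => ⟨hh.2, by omega⟩⟩)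
        (fun r hr hpr => by omega) (fun r hr hpr => by omega)]
    have hdl := pvDL_eq tablero tamanio (f + tamanio - 2) f
    rw [show f + tamanio - 2 - f = tamanio - 2 by ring] at hdl
    exact hdl.symm
  simp only [obtenerDiagonales, obtenerDiagonales_alt, pvSplit]
  simp only [hA, hB]
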